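-- pv_equiv track=rewrite | github.com/rayen112211/ClientEngine | pipeline_state.py | summarize_businesses
-- ===== SOURCE A (Python) =====
-- from typing import Dict, Iterable
--
-- def normalize_status(status: str | None) -> str:
--     """Normalize status values for safer comparisons."""
--     if not status:
--         return ""
--     return str(status).strip().lower()
--
-- def summarize_businesses(businesses: Iterable[dict]) -> Dict[str, int]:
--     """
--     Build dashboard-safe counters from pipeline result rows.
--     """
--     items = list(businesses or [])
--     found = len(items)
--     with_website = 0
--     with_email = 0
--     qualified = 0
--     failed_leads = 0
--     skipped_leads = 0
--     no_website = 0
--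
--     for biz in items:
--         website = (biz.get("website") or "").strip()
--         email = (biz.get("email") or "").strip()
--         qualified_flag = bool(biz.get("qualified"))
--         lead_status = normalize_status(biz.get("lead_status"))
--
--         if website:
--             with_website += 1
--         else:
--             no_website += 1
--         if email:
--             with_email += 1
--         if qualified_flag:
--             qualified += 1
--
--         if lead_status in {"failed", "error", "timeout"}:
--             failed_leads += 1
--         elif not qualified_flag:
--             skipped_leads += 1
--
--     return {
--         "found": found,
--         "with_website": with_website,
--         "with_email": with_email,
--         "qualified": qualified,
--         "failed_leads": failed_leads,
--         "skipped_leads": skipped_leads,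
--         "no_website": no_website,
--     }
-- ===== SOURCE B (Python) =====
-- from typing import Dict, Iterable
--
-- def summarize_businesses(businesses: Iterable[dict]) -> Dict[str, int]:
--     items = list(businesses or [])
--     failed_set = {"failed", "error", "timeout"}
--
--     def _norm(status):
--         if not status:
--             return ""
--         return str(status).strip().lower()
--
--     found = len(items)
--     with_website = sum(1 for b in items if (b.get("website") or "").strip())
--     with_email = sum(1 for b in items if (b.get("email") or "").strip())
--     qualified = sum(1 for b in items if b.get("qualified"))
--     failed_leads = sum(1 for b in items if _norm(b.get("lead_status")) in failed_set)
--     skipped_leads = sum(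
--         1
--         for b in items
--         if _norm(b.get("lead_status")) not in failed_set and not b.get("qualified")
--     )
--     return {
--         "found": found,
--         "with_website": with_website,
--         "with_email": with_email,
--         "qualified": qualified,
--         "failed_leads": failed_leads,
--         "skipped_leads": skipped_leads,
--         "no_website": found - with_website,
--     }
-- ===== Notes on version B (the rewrite author's own statement) =====
-- stated objective: alternative
-- what changed: Replaces A's single loop threading seven mutable counters with independent per-counter passes (one generator-sum per key) and derives no_website arithmetically as found - with_website.
import Mathlib
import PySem

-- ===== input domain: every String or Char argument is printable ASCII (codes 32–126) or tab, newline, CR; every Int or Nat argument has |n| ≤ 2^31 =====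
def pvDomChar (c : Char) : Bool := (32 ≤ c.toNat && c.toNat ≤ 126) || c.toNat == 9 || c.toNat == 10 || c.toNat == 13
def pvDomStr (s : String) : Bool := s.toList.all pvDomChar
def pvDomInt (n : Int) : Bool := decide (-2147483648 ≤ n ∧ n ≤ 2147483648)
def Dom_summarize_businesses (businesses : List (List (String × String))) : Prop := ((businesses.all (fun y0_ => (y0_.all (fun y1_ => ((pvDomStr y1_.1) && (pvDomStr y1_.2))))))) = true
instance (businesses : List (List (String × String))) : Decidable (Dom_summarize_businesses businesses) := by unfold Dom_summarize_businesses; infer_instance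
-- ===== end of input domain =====

-- B replaces A's single seven-counter loop with independent per-counter count passes; alternative decomposition, same cost.
-- Python dicts are association lists here; lookup = first match (List.lookup).

-- ===== PORT A =====
-- normalize_status: '' for None/empty, else strip().lower()
def pvNormalizeStatus (status : Option String) : String :=
  match status with
  | none => ""
  | some s => if s = "" then "" else PySem.Str.lower (PySem.Str.strip s)

-- loop body of A: state is (with_website, with_email, qualified, failed_leads, skipped_leads, no_website)
def pvStepA (acc : Int × Int × Int × Int × Int × Int) (biz : List (String × String)) :
    Int × Int × Int × Int × Int × Int :=
  let website := PySem.Str.strip ((biz.lookup "website").getD "")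
  let email := PySem.Str.strip ((biz.lookup "email").getD "")
  let qualified_flag := ((biz.lookup "qualified").getD "") ≠ ""
  let lead_status := pvNormalizeStatus (biz.lookup "lead_status")
  let (ww, we, q, fl, sk, nw) := acc
  let ww := if website ≠ "" then ww + 1 else ww
  let nw := if website ≠ "" then nw else nw + 1
  let we := if email ≠ "" then we + 1 else we
  let q := if qualified_flag then q + 1 else q
  let fl := if lead_status = "failed" ∨ lead_status = "error" ∨ lead_status = "timeout" then fl + 1 else fl
  let sk := if ¬(lead_status = "failed" ∨ lead_status = "error" ∨ lead_status = "timeout") ∧ ¬qualified_flag then sk + 1 else sk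
  (ww, we, q, fl, sk, nw)

def summarize_businesses (businesses : List (List (String × String))) : List (String × Int) :=
  let found : Int := businesses.length
  let (ww, we, q, fl, sk, nw) := businesses.foldl pvStepA (0, 0, 0, 0, 0, 0)
  [("found", found), ("with_website", ww), ("with_email", we), ("qualified", q),
   ("failed_leads", fl), ("skipped_leads", sk), ("no_website", nw)]

-- ===== PORT B =====
-- per-row boolean tests, one count pass per counter
def pvHasWebsite (b : List (String × String)) : Bool :=
  PySem.Str.strip ((b.lookup "website").getD "") ≠ ""

def pvHasEmail (b : List (String × String)) : Bool :=
  PySem.Str.strip ((b.lookup "email").getD "") ≠ ""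

def pvIsQualified (b : List (String × String)) : Bool :=
  ((b.lookup "qualified").getD "") ≠ ""

def pvIsFailed (b : List (String × String)) : Bool :=
  let s := pvNormalizeStatus (b.lookup "lead_status")
  s = "failed" || s = "error" || s = "timeout"

def summarize_businesses_alt (businesses : List (List (String × String))) : List (String × Int) :=
  let found : Int := businesses.length
  let with_website : Int := businesses.countP pvHasWebsite
  let with_email : Int := businesses.countP pvHasEmail
  let qualified : Int := businesses.countP pvIsQualified
  let failed_leads : Int := businesses.countP pvIsFailed
  let skipped_leads : Int := businesses.countP (fun b => !pvIsFailed b && !pvIsQualified b)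
  [("found", found), ("with_website", with_website), ("with_email", with_email),
   ("qualified", qualified), ("failed_leads", failed_leads), ("skipped_leads", skipped_leads),
   ("no_website", found - with_website)]

-- ===== PRECONDITION & SPEC =====
def Spec_summarize_businesses (businesses : List (List (String × String))) (out : List (String × Int)) : Prop := out = summarize_businesses_alt businesses
instance (businesses : List (List (String × String))) (out : List (String × Int)) : Decidable (Spec_summarize_businesses businesses out) := by unfold Spec_summarize_businesses; infer_instance

-- ===== CLAIM (what is proved, stated in full; the proofs are below) =====
def Claim_equal_summarize_businesses : Prop := ∀ (businesses : List (List (String × String))), Dom_summarize_businesses businesses → Spec_summarize_businesses businesses (summarize_businesses businesses)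

-- ===== LEMMAS AND PROOFS =====

-- A's loop body adds 0/1 per counter according to B's row predicates
theorem pvStepA_eq (biz : List (String × String)) (ww we q fl sk nw : Int) :
    pvStepA (ww, we, q, fl, sk, nw) biz =
      (ww + if pvHasWebsite biz then 1 else 0,
       we + if pvHasEmail biz then 1 else 0,
       q + if pvIsQualified biz then 1 else 0,
       fl + if pvIsFailed biz then 1 else 0,
       sk + if !pvIsFailed biz && !pvIsQualified biz then 1 else 0,
       nw + if !pvHasWebsite biz then 1 else 0) := by
  simp only [pvStepA, pvHasWebsite, pvHasEmail, pvIsQualified, pvIsFailed,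
    Bool.and_eq_true, Bool.not_eq_true', decide_eq_true_eq, decide_eq_false_iff_not]
  split_ifs <;> simp_all

-- A's accumulator after the loop = initial accumulator + the six counts
theorem pvFoldA_eq (l : List (List (String × String))) :
    ∀ acc : Int × Int × Int × Int × Int × Int,
      l.foldl pvStepA acc =
        (acc.1 + l.countP pvHasWebsite,
         acc.2.1 + l.countP pvHasEmail,
         acc.2.2.1 + l.countP pvIsQualified,
         acc.2.2.2.1 + l.countP pvIsFailed,
         acc.2.2.2.2.1 + l.countP (fun b => !pvIsFailed b && !pvIsQualified b),
         acc.2.2.2.2.2 + l.countP (fun b => !pvHasWebsite b)) := by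
  induction l with
  | nil => intro acc; simp
  | cons biz rest ih =>
    intro acc
    obtain ⟨ww, we, q, fl, sk, nw⟩ := acc
    simp only [List.foldl_cons, pvStepA_eq, ih, List.countP_cons]
    split_ifs <;> simp <;> omega

-- found - with_website is the count of rows without a website
theorem countP_not_website (l : List (List (String × String))) :
    (l.length : Int) - l.countP pvHasWebsite = l.countP (fun b => !pvHasWebsite b) := by
  have h1 := List.length_eq_countP_add_countP pvHasWebsite (l := l)
  have h2 : l.countP (fun b => !pvHasWebsite b) = l.countP (fun a => ¬ pvHasWebsite a = true) :=
    List.countP_congr (by intro a _; simp)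
  omega

-- ===== VERDICT (by name: the statement is the Claim_ definition above) =====
theorem summarize_businesses_spec : Claim_equal_summarize_businesses := by
  intro businesses _
  unfold Spec_summarize_businesses summarize_businesses summarize_businesses_alt
  simp only [pvFoldA_eq, zero_add, countP_not_website]
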